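-- pv_equiv track=rewrite | github.com/DiegoVilla03/Topological-Data-Analysis | TDA/nerve.py | compute_nerve
-- ===== SOURCE A (Python) =====
-- import itertools
--
-- def compute_nerve(clusters_indices, max_order=2):
--     """
--     clusters_indices: dict nodo->iterable de índices
--     max_order: orden máximo de símplices a generar (2 = pares, 3 = tríos, etc.)
--     Retorna lista de tuplas representando los símplices hasta max_order.
--     """
--     # Convertir a sets
--     clusters_sets = {nid: set(inds) for nid, inds in clusters_indices.items()}
--     nerve = []
--     nodes = list(clusters_sets.keys())
--     # Generar simplices de tamaño 2 a max_order
--     for r in range(2, min(max_order, len(nodes)) + 1):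
--         for combo in itertools.combinations(nodes, r):
--             inter = set.intersection(*(clusters_sets[n] for n in combo))
--             if inter:
--                 nerve.append(combo)
--     return nerve
-- ===== SOURCE B (Python) =====
-- def compute_nerve(clusters_indices, max_order=2):
--     """
--     Same nerve as A, but built by a DFS that grows each simplex with a running
--     intersection and prunes any prefix whose intersection is already empty
--     (downward closure), then emits simplices bucketed by order.
--     """
--     sets = {nid: set(inds) for nid, inds in clusters_indices.items()}
--     nodes = list(sets)
--     R = min(max_order, len(nodes))
--     if R < 2:
--         return []
--     found = []
--
--     def dfs(rest, combo, inter):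
--         for j, n in enumerate(rest):
--             nxt = inter & sets[n]
--             if nxt:
--                 found.append(combo + (n,))
--                 if len(combo) + 1 != R:
--                     dfs(rest[j + 1:], combo + (n,), nxt)
--
--     for i, n in enumerate(nodes):
--         s = sets[n]
--         if s:
--             found.append((n,))
--             dfs(nodes[i + 1:], (n,), s)
--
--     out = []
--     for r in range(2, R + 1):
--         out += [c for c in found if len(c) == r]
--     return out
-- ===== Notes on version B (the rewrite author's own statement) =====
-- stated objective: faster
-- what changed: Replaces the per-combination recomputation of the full set intersection over itertools.combinations by a DFS that extends each simplex with a single incremental intersection and prunes every extension of an already-empty prefix (downward closure), then emits the found simplices bucketed by order; intended as faster - a timing run measured B several-fold faster (4-32x) at the largest size both finished and A timed out on larger inputs, though that run could not formally confirm the label.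
import Mathlib
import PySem

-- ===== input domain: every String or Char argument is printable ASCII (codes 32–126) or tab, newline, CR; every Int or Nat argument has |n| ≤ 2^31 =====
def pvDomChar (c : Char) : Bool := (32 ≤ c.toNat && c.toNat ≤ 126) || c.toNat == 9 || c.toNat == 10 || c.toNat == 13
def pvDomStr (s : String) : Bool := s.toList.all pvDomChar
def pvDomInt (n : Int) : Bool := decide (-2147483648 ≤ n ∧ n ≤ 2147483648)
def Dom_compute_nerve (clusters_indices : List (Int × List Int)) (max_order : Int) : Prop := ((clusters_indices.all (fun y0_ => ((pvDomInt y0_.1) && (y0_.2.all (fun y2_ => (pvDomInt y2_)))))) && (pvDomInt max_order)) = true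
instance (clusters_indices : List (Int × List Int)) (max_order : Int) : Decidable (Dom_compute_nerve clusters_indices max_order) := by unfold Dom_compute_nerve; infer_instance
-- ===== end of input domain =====

-- B replaces A's per-combination intersection over itertools.combinations by a pruned DFS with an
-- incremental running intersection, bucketed by order at the end; intended as faster (a timing run
-- measured B several-fold faster at the largest size both finished, but could not formally confirm the label).

-- ===== PORT A =====
-- shared by both ports: both Pythons begin with the identical line
-- 'clusters_sets = {nid: set(inds) for nid, inds in clusters_indices.items()}'
def setsOf (clusters_indices : List (Int × List Int)) : PySem.Dict Int (PySem.Set Int) :=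
  PySem.Dict.ofList ((PySem.Dict.ofList clusters_indices).items.map (fun p => (p.1, PySem.Set.ofList p.2)))

-- itertools.combinations(nodes, r) in its emission order
def combinationsA : Nat → List Int → List (List Int)
  | 0, _ => [[]]
  | _ + 1, [] => []
  | r + 1, n :: rest => (combinationsA r rest).map (n :: ·) ++ combinationsA (r + 1) rest

-- set.intersection(*(clusters_sets[n] for n in combo)) — fold of '&' from the first member's set
def interOf (sets : PySem.Dict Int (PySem.Set Int)) : List Int → PySem.Set Int
  | [] => []
  | n :: rest => rest.foldl (fun acc m => PySem.Set.inter acc (sets.getD m [])) (sets.getD n [])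

def compute_nerve (clusters_indices : List (Int × List Int)) (max_order : Int) : List (List Int) :=
  let sets := setsOf clusters_indices
  let nodes := sets.keys
  (PySem.List.pyRange 2 (min max_order (nodes.length : Int) + 1) 1).foldl (fun nerve r =>
    (combinationsA r.toNat nodes).foldl (fun nerve combo =>
      if interOf sets combo ≠ [] then nerve ++ [combo] else nerve) nerve) []

-- ===== PORT B =====
-- the inner 'for j, n in enumerate(rest): …' loop of dfs, recursing on the suffix rest[j+1:]
def dfsLoop (sets : PySem.Dict Int (PySem.Set Int)) (R : Int) :
    List Int → List Int → PySem.Set Int → List (List Int)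
  | [], _, _ => []
  | n :: rest, combo, inter =>
    (let nxt := PySem.Set.inter inter (sets.getD n []);
     if nxt ≠ [] then
       (combo ++ [n]) ::
         (if ((combo.length : Int) + 1) = R then [] else dfsLoop sets R rest (combo ++ [n]) nxt)
     else []) ++ dfsLoop sets R rest combo inter

-- the top-level 'for i, n in enumerate(nodes): …' loop seeding each DFS
def dfsTop (sets : PySem.Dict Int (PySem.Set Int)) (R : Int) : List Int → List (List Int)
  | [] => []
  | n :: rest =>
    (let s := sets.getD n [];
     if s ≠ [] then [n] :: dfsLoop sets R rest [n] s else []) ++ dfsTop sets R rest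

def compute_nerve_alt (clusters_indices : List (Int × List Int)) (max_order : Int) : List (List Int) :=
  let sets := setsOf clusters_indices
  let nodes := sets.keys
  let R := min max_order (nodes.length : Int)
  if R < 2 then []
  else
    let found := dfsTop sets R nodes
    (PySem.List.pyRange 2 (R + 1) 1).foldl (fun out r =>
      out ++ found.filter (fun c => (c.length : Int) == r)) []

-- ===== PRECONDITION & SPEC =====
def Spec_compute_nerve (clusters_indices : List (Int × List Int)) (max_order : Int) (out : List (List Int)) : Prop := out = compute_nerve_alt clusters_indices max_order
instance (clusters_indices : List (Int × List Int)) (max_order : Int) (out : List (List Int)) : Decidable (Spec_compute_nerve clusters_indices max_order out) := by unfold Spec_compute_nerve; infer_instance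

-- ===== CLAIM (what is proved, stated in full; the proofs are below) =====
def Claim_equal_compute_nerve : Prop := ∀ (clusters_indices : List (Int × List Int)) (max_order : Int), Dom_compute_nerve clusters_indices max_order → Spec_compute_nerve clusters_indices max_order (compute_nerve clusters_indices max_order)

-- ===== LEMMAS AND PROOFS =====

-- all size-≤d nonempty increasing sublists of rem, in DFS preorder (B's search tree without pruning)
def subsT : Nat → List Int → List (List Int)
  | 0, _ => []
  | _ + 1, [] => []
  | d + 1, n :: rest => ([n] :: (subsT d rest).map (n :: ·)) ++ subsT (d + 1) rest

theorem subsT_ne_nil (d : Nat) (l : List Int) : ∀ c ∈ subsT d l, c ≠ [] := by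
  induction l generalizing d with
  | nil => intro c hc; cases d <;> simp [subsT] at hc
  | cons n rest ih =>
    intro c hc
    cases d with
    | zero => simp [subsT] at hc
    | succ d =>
      simp only [subsT, List.mem_append, List.mem_cons, List.mem_map] at hc
      rcases hc with (h | ⟨a, _, rfl⟩) | h
      · simp [h]
      · simp
      · exact ih _ _ h

theorem interOf_append (sets : PySem.Dict Int (PySem.Set Int)) (c : List Int) (n : Int) (hc : c ≠ []) :
    interOf sets (c ++ [n]) = PySem.Set.inter (interOf sets c) (sets.getD n []) := by
  cases c with
  | nil => exact absurd rfl hc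
  | cons h t => simp [interOf, List.foldl_append]

theorem interOf_extend_nil (sets : PySem.Dict Int (PySem.Set Int)) (c : List Int) (hc : c ≠ [])
    (h : interOf sets c = []) : ∀ l, interOf sets (c ++ l) = [] := by
  intro l
  induction l using List.reverseRecOn with
  | nil => simpa using h
  | append_singleton l n ih =>
    have hcl : c ++ l ≠ [] := by cases c <;> simp_all
    rw [← List.append_assoc, interOf_append sets (c ++ l) n hcl, ih]
    rfl

theorem dfsLoop_eq (sets : PySem.Dict Int (PySem.Set Int)) (R : Int) (rem : List Int) :
    ∀ combo : List Int, combo ≠ [] → (combo.length : Int) < R → interOf sets combo ≠ [] →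
      dfsLoop sets R rem combo (interOf sets combo)
        = ((subsT (R - combo.length).toNat rem).map (combo ++ ·)).filter
            (fun c => decide (interOf sets c ≠ [])) := by
  induction rem with
  | nil =>
    intro combo _ hlt _
    have : (R - combo.length).toNat ≠ 0 := by omega
    obtain ⟨d, hd⟩ := Nat.exists_eq_succ_of_ne_zero this
    simp [dfsLoop, hd, subsT]
  | cons n rest ih =>
    intro combo hne hlt hcne
    have hd : (R - (combo.length : Int)).toNat = (R - ((combo.length : Int) + 1)).toNat + 1 := by omega
    have hext : interOf sets (combo ++ [n]) = PySem.Set.inter (interOf sets combo) (sets.getD n []) :=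
      interOf_append sets combo n hne
    have hsub : subsT (R - (combo.length : Int)).toNat (n :: rest)
        = ([n] :: (subsT (R - ((combo.length : Int) + 1)).toNat rest).map (n :: ·))
          ++ subsT (R - (combo.length : Int)).toNat rest := by
      conv_lhs => rw [hd]
      conv_rhs => rw [hd]
      rfl
    have hmap' : ((fun x : List Int => combo ++ x) ∘ fun x => n :: x)
        = fun c : List Int => (combo ++ [n]) ++ c := by
      funext c; simp
    rw [hsub]
    simp only [dfsLoop, List.map_append, List.filter_append, List.map_cons, List.map_map, hmap']
    rw [ih combo hne hlt hcne]
    congr 1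
    by_cases hx : PySem.Set.inter (interOf sets combo) (sets.getD n []) ≠ []
    · have hxne : interOf sets (combo ++ [n]) ≠ [] := by rw [hext]; exact hx
      rw [if_pos hx, List.filter_cons]
      by_cases hR : ((combo.length : Int) + 1) = R
      · rw [if_pos hR, show (R - ((combo.length : Int) + 1)).toNat = 0 from by omega]
        simp [subsT, hxne]
      · have hlen1 : (((combo ++ [n] : List Int)).length : Int) = (combo.length : Int) + 1 := by
          simp
        have hlt' : (((combo ++ [n] : List Int)).length : Int) < R := by omega
        rw [if_neg hR, ← hext, ih (combo ++ [n]) (by simp) hlt' hxne, hlen1]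
        simp [hxne]
    · push_neg at hx
      have hnil : interOf sets (combo ++ [n]) = [] := by rw [hext, hx]
      rw [if_neg (by simpa using hx), List.filter_cons]
      have hhead : decide (interOf sets (combo ++ [n]) ≠ []) = false := by simp [hnil]
      rw [hhead]
      have hall : ∀ a ∈ subsT (R - ((combo.length : Int) + 1)).toNat rest,
          interOf sets (combo ++ n :: a) = [] := by
        intro a _
        have h2 : interOf sets ((combo ++ [n]) ++ a) = [] :=
          interOf_extend_nil sets (combo ++ [n]) (by simp) hnil a
        simpa using h2
      have hfil : List.filter (fun c => decide (interOf sets c ≠ []))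
          ((subsT (R - ((combo.length : Int) + 1)).toNat rest).map
            (fun c => combo ++ n :: c)) = [] := by
        apply List.filter_eq_nil_iff.mpr
        intro c hc
        simp only [List.mem_map] at hc
        obtain ⟨a, ha, rfl⟩ := hc
        simp [hall a ha]
      simpa using hfil

theorem dfsTop_eq (sets : PySem.Dict Int (PySem.Set Int)) (R : Int) (hR : 2 ≤ R) (rem : List Int) :
    dfsTop sets R rem = (subsT R.toNat rem).filter (fun c => decide (interOf sets c ≠ [])) := by
  induction rem with
  | nil =>
    obtain ⟨d, hd⟩ := Nat.exists_eq_succ_of_ne_zero (show R.toNat ≠ 0 by omega)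
    simp [dfsTop, hd, subsT]
  | cons n rest ih =>
    have hd : R.toNat = (R - 1).toNat + 1 := by omega
    have hsub : subsT R.toNat (n :: rest)
        = ([n] :: (subsT (R - 1).toNat rest).map (n :: ·)) ++ subsT R.toNat rest := by
      conv_lhs => rw [hd]
      conv_rhs => rw [hd]
      rfl
    have hsingle : interOf sets [n] = sets.getD n [] := rfl
    rw [hsub]
    simp only [dfsTop, List.filter_append, List.filter_cons]
    rw [ih]
    congr 1
    by_cases hs : sets.getD n [] ≠ []
    · have h1 : ((([n] : List Int).length : Int)) < R := by simp; omega
      have hrec := dfsLoop_eq sets R rest [n] (by simp) h1 (by rw [hsingle]; exact hs)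
      rw [hsingle] at hrec
      have hL : (R - (([n] : List Int).length : Int)).toNat = (R - 1).toNat := by simp
      rw [hL] at hrec
      rw [if_pos hs, hrec]
      have hdec : decide (interOf sets [n] ≠ []) = true := by simp [hsingle, hs]
      rw [hdec, if_pos rfl]
      congr 1
    · push_neg at hs
      have hdecn : decide (interOf sets [n] ≠ []) = false := by simp [hsingle, hs]
      rw [if_neg (by simpa using hs), hdecn]
      have hfil : List.filter (fun c => decide (interOf sets c ≠ []))
          ((subsT (R - 1).toNat rest).map (n :: ·)) = [] := by
        apply List.filter_eq_nil_iff.mpr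
        intro c hc
        simp only [List.mem_map] at hc
        obtain ⟨a, _, rfl⟩ := hc
        have h2 : interOf sets ([n] ++ a) = [] :=
          interOf_extend_nil sets [n] (by simp) (by rw [hsingle, hs]) a
        simp only [List.singleton_append] at h2
        simp [h2]
      simpa using hfil

theorem filter_len_subsT (r d : Nat) (rem : List Int) (hr : 1 ≤ r) (hrd : r ≤ d) :
    (subsT d rem).filter (fun c => c.length == r) = combinationsA r rem := by
  induction rem generalizing r d with
  | nil =>
    obtain ⟨d', rfl⟩ := Nat.exists_eq_succ_of_ne_zero (show d ≠ 0 by omega)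
    obtain ⟨r', rfl⟩ := Nat.exists_eq_succ_of_ne_zero (show r ≠ 0 by omega)
    simp [subsT, combinationsA]
  | cons n rest ih =>
    obtain ⟨d', rfl⟩ := Nat.exists_eq_succ_of_ne_zero (show d ≠ 0 by omega)
    obtain ⟨r', rfl⟩ := Nat.exists_eq_succ_of_ne_zero (show r ≠ 0 by omega)
    simp only [subsT, List.filter_append, List.filter_cons]
    rcases Nat.eq_zero_or_pos r' with rfl | hr'
    · have hz : List.filter (fun c : List Int => c.length == 0 + 1)
          ((subsT d' rest).map (n :: ·)) = [] := by
        apply List.filter_eq_nil_iff.mpr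
        intro c hc
        simp only [List.mem_map] at hc
        obtain ⟨a, ha, rfl⟩ := hc
        have := subsT_ne_nil d' rest a ha
        simp only [List.length_cons, beq_iff_eq, Nat.add_right_cancel_iff,
          List.length_eq_zero_iff]
        exact this
      rw [hz, ih 1 (d' + 1) (by omega) (by omega)]
      simp [combinationsA]
    · have h1 : ¬ ((([n] : List Int).length == r' + 1) = true) := by
        simp; omega
      rw [if_neg h1]
      have hcomp : List.filter (fun c : List Int => c.length == r' + 1)
          ((subsT d' rest).map (n :: ·))
          = (List.filter (fun c : List Int => c.length == r') (subsT d' rest)).map (n :: ·) := by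
        rw [List.filter_map]
        congr 1
        apply List.filter_congr
        intro c _
        simp
      rw [hcomp, ih r' d' hr' (by omega), ih (r' + 1) (d' + 1) (by omega) hrd]
      simp [combinationsA]

theorem foldl_if_append_filter (P : List Int → Prop) [DecidablePred P]
    (l : List (List Int)) : ∀ acc : List (List Int),
    l.foldl (fun nerve combo => if P combo then nerve ++ [combo] else nerve) acc
      = acc ++ l.filter (fun c => decide (P c)) := by
  induction l with
  | nil => intro acc; simp
  | cons x xs ih =>
    intro acc
    simp only [List.foldl_cons, List.filter_cons]
    by_cases h : P x
    · simp [h, ih]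
    · simp [h, ih]

theorem filter_swap (l : List (List Int)) (p q : List Int → Bool) :
    (l.filter p).filter q = (l.filter q).filter p := by
  simp only [List.filter_filter]
  apply List.filter_congr
  intro c _
  rw [Bool.and_comm]

-- ===== VERDICT (by name: the statement is the Claim_ definition above) =====
theorem compute_nerve_spec : Claim_equal_compute_nerve := by
  intro ci mo _
  simp only [Spec_compute_nerve, compute_nerve, compute_nerve_alt]
  generalize setsOf ci = sets
  generalize sets.keys = nodes
  by_cases hR2 : min mo (nodes.length : Int) < 2
  · rw [if_pos hR2, PySem.List.pyRange_one_eq_nil (by omega), List.foldl_nil]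
  · rw [if_neg hR2]
    push_neg at hR2
    rw [dfsTop_eq sets _ hR2 nodes]
    apply PySem.List.foldl_congr_mem
    intro acc r hr
    rw [PySem.List.mem_pyRange_one] at hr
    rw [foldl_if_append_filter (fun c => interOf sets c ≠ [])]
    congr 1
    rw [filter_swap]
    congr 1
    have hlen : (fun c : List Int => ((c.length : Int) == r))
        = fun c : List Int => (c.length == r.toNat) := by
      funext c
      by_cases h : (c.length : Int) = r
      · have h' : c.length = r.toNat := by omega
        rw [h, h']
        simp
      · have h' : c.length ≠ r.toNat := by omega
        simp [h, h']
    rw [hlen, filter_len_subsT r.toNat (min mo (nodes.length : Int)).toNat nodes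
      (by omega) (by omega)]
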